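-- pv_equiv track=rewrite | github.com/suhyeon7675/python_algorithm | 2023-05-15/전화번호 목록/4_이트.py | solution
-- ===== SOURCE A (Python) =====
-- def solution(phone_book):
--     answer = True
--     temp = phone_book.copy()
--     for p in phone_book:
--         temp.remove(p)
--         for t in temp:
--             if p in t:
--                 return False
--         temp.append(p)
--     return answer
-- ===== SOURCE B (Python) =====
-- def solution(phone_book):
--     # Count how often each full number occurs, then test every substring of
--     # every number against that hash index (instead of pairwise scans).
--     counts = {}
--     for p in phone_book:
--         counts[p] = counts.get(p, 0) + 1
--     for t in phone_book:
--         n = len(t)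
--         for a in range(n + 1):
--             for b in range(a, n + 1):
--                 s = t[a:b]
--                 if counts.get(s, 0) - (s == t) > 0:
--                     return False
--     return True
-- ===== Notes on version B (the rewrite author's own statement) =====
-- stated objective: alternative
-- what changed: Instead of A's pairwise scan that tests every number against every other number with the substring operator, B builds a hash count of the full numbers once and tests each substring of each number against that index, so the inner scan over the other numbers disappears (it trades the pairwise scan for substring enumeration).
import Mathlib
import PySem

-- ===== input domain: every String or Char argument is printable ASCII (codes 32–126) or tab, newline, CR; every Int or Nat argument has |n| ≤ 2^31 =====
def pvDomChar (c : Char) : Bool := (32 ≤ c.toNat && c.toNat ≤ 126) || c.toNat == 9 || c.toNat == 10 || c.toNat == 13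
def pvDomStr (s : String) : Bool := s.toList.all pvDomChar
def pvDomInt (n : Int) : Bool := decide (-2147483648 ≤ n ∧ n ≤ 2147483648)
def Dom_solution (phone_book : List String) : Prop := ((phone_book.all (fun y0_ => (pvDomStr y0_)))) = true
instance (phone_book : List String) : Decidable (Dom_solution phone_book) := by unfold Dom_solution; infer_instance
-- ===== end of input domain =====

-- B replaces A's pairwise substring scans by a hash index: count every full number once,
-- then test each substring of each number against that count table (objective: alternative algorithm).

-- ===== PORT A =====
-- the for-loop over phone_book with the mutating `temp` list; early `return False` = result false
def solutionGo (rest temp : List String) : Bool :=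
  match rest with
  | [] => true
  | p :: rs =>
    match PySem.List.remove? temp p with
    | none => true   -- Python's temp.remove(p) would raise; unreachable: temp is always a permutation of phone_book
    | some temp' =>
      if temp'.any (fun t => PySem.Str.isIn p t) then false
      else solutionGo rs (temp' ++ [p])

def solution (phone_book : List String) : Bool :=
  solutionGo phone_book phone_book

-- ===== PORT B =====
def solution_alt (phone_book : List String) : Bool :=
  let counts := phone_book.foldl (fun d p => d.insert p (d.getD p 0 + 1))
      (PySem.Dict.empty : PySem.Dict String Int)
  phone_book.all (fun t =>
    (PySem.List.pyRange 0 (PySem.Str.len t + 1) 1).all (fun a =>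
      (PySem.List.pyRange a (PySem.Str.len t + 1) 1).all (fun b =>
        !(decide (counts.getD (PySem.Str.slice t (some a) (some b)) 0
            - (if PySem.Str.slice t (some a) (some b) = t then (1:Int) else 0) > 0)))))

-- ===== PRECONDITION & SPEC =====
def Spec_solution (phone_book : List String) (out : Bool) : Prop := out = solution_alt phone_book
instance (phone_book : List String) (out : Bool) : Decidable (Spec_solution phone_book out) := by unfold Spec_solution; infer_instance

-- ===== CLAIM (what is proved, stated in full; the proofs are below) =====
def Claim_equal_solution : Prop := ∀ (phone_book : List String), Dom_solution phone_book → Spec_solution phone_book (solution phone_book)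

-- ===== LEMMAS AND PROOFS =====

-- A's loop, with `temp` any permutation of the full list, tests each remaining p against the full list minus one copy of p
theorem solutionGo_eq (full : List String) :
    ∀ (rest temp : List String), temp.Perm full → (∀ p ∈ rest, p ∈ full) →
      solutionGo rest temp
        = rest.all (fun p => !((full.erase p).any (fun t => PySem.Str.isIn p t))) := by
  intro rest
  induction rest with
  | nil => intro temp _ _; rfl
  | cons p rs ih =>
    intro temp hperm hsub
    have hp : p ∈ temp := hperm.mem_iff.mpr (hsub p (by simp))
    have hrem := PySem.List.remove?_eq_some_erase temp p hp
    have hany : (temp.erase p).any (fun t => PySem.Str.isIn p t)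
        = (full.erase p).any (fun t => PySem.Str.isIn p t) :=
      (hperm.erase p).any_eq
    have hperm' : (temp.erase p ++ [p]).Perm full :=
      ((List.perm_append_singleton p _).trans (List.perm_cons_erase hp).symm).trans hperm
    have hunf : solutionGo (p :: rs) temp
        = if (temp.erase p).any (fun t => PySem.Str.isIn p t) then false
          else solutionGo rs (temp.erase p ++ [p]) := by
      simp only [solutionGo, hrem]
    rw [hunf, hany, List.all_cons,
      ih (temp.erase p ++ [p]) hperm' (fun q hq => hsub q (List.mem_cons_of_mem _ hq))]
    cases h : (full.erase p).any (fun t => PySem.Str.isIn p t) <;> simp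

-- the manual counting loop of B is List.count
theorem counts_getD (pb : List String) (d : PySem.Dict String Int) (s : String) :
    (pb.foldl (fun d p => d.insert p (d.getD p 0 + 1)) d).getD s 0
      = d.getD s 0 + (pb.count s : Int) := by
  induction pb generalizing d with
  | nil => simp
  | cons p rest ih =>
    simp only [List.foldl_cons, ih, PySem.Dict.getD_insert, List.count_cons]
    by_cases h : s = p
    · subst h; simp; ring
    · simp [h, Ne.symm h]

-- B's count test is membership in the list with one copy of t removed
theorem count_sub_iff (pb : List String) (s t : String) :
    ((pb.count s : Int) - (if s = t then 1 else 0) > 0) ↔ s ∈ pb.erase t := by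
  rw [← List.count_pos_iff (a := s) (l := pb.erase t), List.count_erase]
  simp only [beq_iff_eq]
  by_cases h : s = t
  · subst h; simp
  · rw [if_neg h, if_neg (Ne.symm h)]; omega

-- a pair of occurrences "a, and b elsewhere" is the same pair read the other way round
theorem mem_erase_swap (l : List String) (a b : String) :
    (a ∈ l ∧ b ∈ l.erase a) ↔ (b ∈ l ∧ a ∈ l.erase b) := by
  by_cases hab : a = b
  · subst hab; tauto
  · rw [List.mem_erase_of_ne (fun h => hab h.symm), List.mem_erase_of_ne hab]
    tauto

-- the double range loop of B enumerates exactly the infixes of t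
theorem forall_slice_iff_infix (t : String) (P : String → Prop) :
    (∀ a ∈ PySem.List.pyRange 0 (PySem.Str.len t + 1) 1,
       ∀ b ∈ PySem.List.pyRange a (PySem.Str.len t + 1) 1,
         P (PySem.Str.slice t (some a) (some b)))
      ↔ ∀ s : String, s.toList <:+: t.toList → P s := by
  simp only [PySem.List.mem_pyRange_one, PySem.Str.len_eq]
  constructor
  · intro h s hs
    obtain ⟨u, v, huv⟩ := hs
    have hlen : t.toList.length = u.length + s.toList.length + v.length := by
      rw [← huv]; simp only [List.length_append]
    have hslice : PySem.Str.slice t (some (u.length : Int))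
        (some ((u.length : Int) + (s.toList.length : Int))) = s := by
      apply String.toList_inj.mp
      rw [PySem.Str.toList_slice]
      show PySem.List.slice t.toList _ _ = s.toList
      rw [PySem.List.slice_toNat _ (by positivity) (by positivity)]
      have : ((u.length : Int) + (s.toList.length : Int)).toNat - (u.length : Int).toNat
          = s.toList.length := by omega
      rw [this]
      have h2 : (u.length : Int).toNat = u.length := by omega
      rw [h2, ← huv, List.append_assoc, List.drop_left, List.take_left]
    have := h (u.length : Int) ⟨by positivity, by omega⟩
        ((u.length : Int) + (s.toList.length : Int)) ⟨by omega, by omega⟩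
    rwa [hslice] at this
  · intro h a ⟨ha0, _⟩ b ⟨hab, _⟩
    apply h
    rw [PySem.Str.toList_slice]
    show PySem.List.slice t.toList _ _ <:+: t.toList
    rw [PySem.List.slice_toNat _ ha0 (by omega)]
    exact ((List.take_prefix _ _).isInfix).trans ((List.drop_suffix _ _).isInfix)

theorem solution_eq_alt (pb : List String) : solution pb = solution_alt pb := by
  have hA : solution pb = true
      ↔ ∀ p ∈ pb, ∀ t ∈ pb.erase p, ¬ (p.toList <:+: t.toList) := by
    rw [solution, solutionGo_eq pb pb pb (List.Perm.refl pb) (fun _ h => h)]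
    simp [List.all_eq_true, PySem.Chars.isIn_eq_false_iff]
  have hB : solution_alt pb = true
      ↔ ∀ t ∈ pb, ∀ s : String, s.toList <:+: t.toList → s ∉ pb.erase t := by
    simp only [solution_alt, List.all_eq_true, Bool.not_eq_true',
      decide_eq_false_iff_not, counts_getD, PySem.Dict.getD_empty, zero_add]
    constructor
    · intro h t ht
      refine (forall_slice_iff_infix t (fun s => s ∉ pb.erase t)).mp ?_
      intro a ha b hb hmem
      exact h t ht a ha b hb ((count_sub_iff pb _ t).mpr hmem)
    · intro h t ht a ha b hb hlt
      exact (forall_slice_iff_infix t (fun s => s ∉ pb.erase t)).mpr (h t ht) a ha b hb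
        ((count_sub_iff pb _ t).mp hlt)
  rw [Bool.eq_iff_iff, hA, hB]
  constructor
  · intro h t ht s hs hmem
    obtain ⟨hs1, hs2⟩ := (mem_erase_swap pb t s).mp ⟨ht, hmem⟩
    exact h s hs1 t hs2 hs
  · intro h p hp t ht hinf
    obtain ⟨ht1, ht2⟩ := (mem_erase_swap pb p t).mp ⟨hp, ht⟩
    exact h t ht1 p hinf ht2

-- ===== VERDICT (by name: the statement is the Claim_ definition above) =====
theorem solution_spec : Claim_equal_solution := by
  intro pb _
  unfold Spec_solution
  exact solution_eq_alt pb
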